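-- pv_equiv track=rewrite | github.com/zoidypuh/openclaw-voice-server | src/openclaw_voice_server/text.py | resolve_command_language
-- ===== SOURCE A (Python) =====
-- _COMMAND_KEYWORDS = {
--     "de": {
--         "interrupt": {"stopp"},
--         "pause": {"pause", "pausieren"},
--         "send_phrases": ("hey los", "los"),
--     },
--     "en": {
--         "interrupt": {"stop"},
--         "pause": {"pause"},
--         "send_phrases": ("hey go", "go"),
--     },
-- }
--
-- def resolve_command_language(language: str | None) -> str | None:
--     normalized = str(language or "").strip().lower()
--     if not normalized:
--         return None
--     for prefix in _COMMAND_KEYWORDS: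
--         if normalized == prefix or normalized.startswith(f"{prefix}-"):
--             return prefix
--     return None
-- ===== SOURCE B (Python) =====
-- _COMMAND_KEYWORDS = {
--     "de": {
--         "interrupt": {"stopp"},
--         "pause": {"pause", "pausieren"},
--         "send_phrases": ("hey los", "los"),
--     },
--     "en": {
--         "interrupt": {"stop"},
--         "pause": {"pause"},
--         "send_phrases": ("hey go", "go"),
--     },
-- }
--
-- def resolve_command_language(language):
--     normalized = str(language or "").strip().lower()
--     if not normalized:
--         return None
--     candidate = normalized.split("-", 1)[0]
--     return candidate if candidate in _COMMAND_KEYWORDS else None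
-- ===== Notes on version B (the rewrite author's own statement) =====
-- stated objective: simpler
-- what changed: Replaces the loop over dictionary keys with prefix-matching tests by extracting the first '-'-separated segment once via split and doing a single membership lookup.
import Mathlib
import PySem

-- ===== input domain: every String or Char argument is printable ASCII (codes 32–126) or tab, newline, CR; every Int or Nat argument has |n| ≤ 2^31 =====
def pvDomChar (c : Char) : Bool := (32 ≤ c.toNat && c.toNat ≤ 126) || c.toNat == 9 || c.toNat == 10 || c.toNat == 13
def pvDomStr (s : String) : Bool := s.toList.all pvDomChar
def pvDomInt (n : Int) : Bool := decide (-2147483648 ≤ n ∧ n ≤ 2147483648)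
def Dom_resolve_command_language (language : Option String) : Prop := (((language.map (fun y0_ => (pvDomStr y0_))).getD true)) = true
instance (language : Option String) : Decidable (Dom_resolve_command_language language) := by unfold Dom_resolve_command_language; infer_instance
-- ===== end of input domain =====

-- B replaces A's loop over keys with prefix tests by extracting the first '-'-segment once and doing a single membership test (objective: simpler).

-- ===== PORT A =====
-- the `for prefix in _COMMAND_KEYWORDS:` loop, iterating over the dict's keys in insertion order
def resolveLoopA (keys : List String) (normalized : String) : Option String :=
  match keys with
  | [] => none
  | p :: rest =>
      if normalized = p || PySem.Str.startswith normalized (p ++ "-") then some p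
      else resolveLoopA rest normalized

def resolve_command_language (language : Option String) : Option String :=
  let normalized := PySem.Str.lower (PySem.Str.strip (language.getD ""))
  if normalized = "" then none
  else resolveLoopA ["de", "en"] normalized

-- ===== PORT B =====
def resolve_command_language_alt (language : Option String) : Option String :=
  let normalized := PySem.Str.lower (PySem.Str.strip (language.getD ""))
  if normalized = "" then none
  else
    -- normalized.split("-", 1)[0]; the sep is nonempty so split? is some, and the
    -- resulting list is never empty, so the [0] indexing is total (headD)
    let candidate := ((PySem.Str.splitMax? normalized "-" 1).getD []).headD ""
    if candidate = "de" || candidate = "en" then some candidate else none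

-- ===== PRECONDITION & SPEC =====
def Spec_resolve_command_language (language : Option String) (out : Option String) : Prop := out = resolve_command_language_alt language
instance (language : Option String) (out : Option String) : Decidable (Spec_resolve_command_language language out) := by unfold Spec_resolve_command_language; infer_instance

-- ===== CLAIM (what is proved, stated in full; the proofs are below) =====
def Claim_equal_resolve_command_language : Prop := ∀ (language : Option String), Dom_resolve_command_language language → Spec_resolve_command_language language (resolve_command_language language)

-- ===== LEMMAS AND PROOFS =====

-- the head of `go` once the single allowed split has been used (maxsplit hit 0) is the first accumulated piece
lemma go_zero_head (fuel : Nat) (l : List Char) (x : List Char) :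
    (PySem.Chars.splitOnMax.go ['-'] fuel 0 l [] [x]).head?.getD [] = x := by
  cases fuel <;> cases l <;> simp [PySem.Chars.splitOnMax.go]

-- the head of the 1-bounded split is everything before the first '-'
lemma go_one_head (fuel : Nat) (l cur : List Char) (h : l.length ≤ fuel) :
    (PySem.Chars.splitOnMax.go ['-'] fuel 1 l cur []).headD [] =
      cur.reverse ++ l.takeWhile (· ≠ '-') := by
  induction fuel generalizing l cur with
  | zero =>
    have : l = [] := by cases l <;> simp_all
    subst this; simp [PySem.Chars.splitOnMax.go]
  | succ n ih =>
    cases l with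
    | nil => simp [PySem.Chars.splitOnMax.go]
    | cons c rest =>
      by_cases hc : c = '-'
      · subst hc
        simp only [PySem.Chars.splitOnMax.go]
        simp [List.isPrefixOf, go_zero_head]
      · have hpre : List.isPrefixOf ['-'] (c :: rest) = false := by
          simp [List.isPrefixOf]; exact fun h => absurd h.symm hc
        simp only [PySem.Chars.splitOnMax.go, hpre, Bool.false_eq_true, if_false]
        rw [if_neg one_ne_zero, ih rest (c :: cur) (by simpa using Nat.le_of_succ_le_succ h)]
        simp [hc]

lemma headD_map_ofList (L : List (List Char)) :
    (L.map String.ofList).headD "" = String.ofList (L.headD []) := by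
  cases L <;> simp

lemma split_head (s : String) :
    ((PySem.Str.splitMax? s "-" 1).getD []).headD "" =
      String.ofList (s.toList.takeWhile (· ≠ '-')) := by
  have h1 : PySem.Chars.splitMax? s.toList ("-" : String).toList 1 =
      some (PySem.Chars.splitOnMax.go ['-'] (s.toList.length + 1) 1 s.toList [] []) := by
    simp [PySem.Chars.splitMax?, PySem.Chars.splitOnMax]
  rw [PySem.Str.splitMax?, h1, Option.map_some, Option.getD_some, headD_map_ofList,
    go_one_head (s.toList.length + 1) s.toList [] (by omega)]
  rw [List.reverse_nil, List.nil_append]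

-- first '-'-segment equals a '-'-free key iff the string is the key or starts with key ++ "-"
lemma takeWhile_eq_key (k : List Char) (hk : '-' ∉ k) (l : List Char) :
    l.takeWhile (· ≠ '-') = k ↔ (l = k ∨ (k ++ ['-']) <+: l) := by
  induction k generalizing l with
  | nil =>
    cases l with
    | nil => simp
    | cons c r =>
      by_cases hc : c = '-'
      · subst hc; simp [List.prefix_cons_iff]
      · simp [hc, List.cons_prefix_cons, Ne.symm hc]
  | cons a k' ih =>
    have ha : a ≠ '-' := fun h => hk (h ▸ List.mem_cons_self)
    have hk' : '-' ∉ k' := fun h => hk (List.mem_cons_of_mem _ h)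
    cases l with
    | nil => simp
    | cons c r =>
      by_cases hc : c = '-'
      · subst hc
        simp [List.cons_prefix_cons, Ne.symm ha, ha]
      · have hstep : List.takeWhile (fun x => decide (x ≠ '-')) (c :: r) =
            c :: List.takeWhile (fun x => decide (x ≠ '-')) r := by
          simp [hc]
        rw [show ((· ≠ '-') : Char → Bool) = (fun x => decide (x ≠ '-')) from rfl] at *
        rw [hstep]
        simp only [List.cons.injEq, List.cons_append, List.cons_prefix_cons, ih hk' r]
        constructor
        · rintro ⟨rfl, h | h⟩
          · exact Or.inl ⟨rfl, h⟩
          · exact Or.inr ⟨rfl, h⟩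
        · rintro (⟨rfl, h⟩ | ⟨rfl, h⟩)
          · exact ⟨rfl, Or.inl h⟩
          · exact ⟨rfl, Or.inr h⟩

lemma ofList_eq_lit (t : List Char) : ∀ (k : String), (String.ofList t = k) ↔ t = k.toList := by
  intro k
  constructor
  · intro h; have := congrArg String.toList h; simpa using this
  · intro h; subst h; exact String.toList_inj.mp (by simp)

-- the core: the key loop of A equals B's extract-then-test on every string
lemma loop_eq_candidate (n : String) :
    resolveLoopA ["de", "en"] n =
      (let candidate := ((PySem.Str.splitMax? n "-" 1).getD []).headD ""
       if candidate = "de" || candidate = "en" then some candidate else none) := by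
  simp only [split_head]
  have hde := takeWhile_eq_key "de".toList (by decide) n.toList
  have hen := takeWhile_eq_key "en".toList (by decide) n.toList
  have b1 : (decide (n = "de") || PySem.Str.startswith n ("de" ++ "-")) = true ↔
      n.toList.takeWhile (· ≠ '-') = "de".toList := by
    rw [Bool.or_eq_true, decide_eq_true_eq, PySem.Str.startswith_eq, PySem.Chars.startswith_iff,
      hde, ← String.toList_inj]
    simp
  have b2 : (decide (n = "en") || PySem.Str.startswith n ("en" ++ "-")) = true ↔
      n.toList.takeWhile (· ≠ '-') = "en".toList := by
    rw [Bool.or_eq_true, decide_eq_true_eq, PySem.Str.startswith_eq, PySem.Chars.startswith_iff,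
      hen, ← String.toList_inj]
    simp
  simp only [resolveLoopA]
  by_cases h1 : n.toList.takeWhile (· ≠ '-') = "de".toList
  · rw [if_pos (b1.mpr h1)]
    simp only [ofList_eq_lit, h1]
    decide
  · rw [if_neg (fun h => h1 (b1.mp h))]
    by_cases h2 : n.toList.takeWhile (· ≠ '-') = "en".toList
    · rw [if_pos (b2.mpr h2)]
      simp only [ofList_eq_lit, h2]
      decide
    · rw [if_neg (fun h => h2 (b2.mp h))]
      simp only [ofList_eq_lit]
      rw [if_neg (by simp [decide_not]; exact ⟨fun h => h1 (by simpa using h), fun h => h2 (by simpa using h)⟩)]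


-- ===== VERDICT (by name: the statement is the Claim_ definition above) =====
theorem resolve_command_language_spec : Claim_equal_resolve_command_language := by
  intro language _
  unfold Spec_resolve_command_language resolve_command_language resolve_command_language_alt
  by_cases h : PySem.Str.lower (PySem.Str.strip (language.getD "")) = ""
  · simp [h]
  · simp only [if_neg h]
    exact loop_eq_candidate _
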